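-- pv_equiv track=rewrite | github.com/StefanNede/BIO-Practice | 2016/promenadeFractions.py | solve
-- ===== SOURCE A (Python) =====
-- def solve(p):
--     # default values
--     beforeLeft = [1,0]
--     beforeRight = [0,1]
--
--     for letter in p:
--         overall = [beforeLeft[0]+beforeRight[0],beforeLeft[1]+beforeRight[1]]
--         if letter == 'L':
--             beforeLeft = overall
--         else:
--             beforeRight = overall
--
--     # need to add the final beforeR or beforeL that we got by going over the final letter
--     overall = [beforeLeft[0]+beforeRight[0],beforeLeft[1]+beforeRight[1]]
--
--     return overall
-- ===== SOURCE B (Python) =====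
-- def solve(p):
--     # run-batched Stern-Brocot walk: one multiply per maximal run of equal letters
--     bl = (1, 0)
--     br = (0, 1)
--     i = 0
--     n = len(p)
--     while i < n:
--         j = i
--         while j < n and p[j] == p[i]:
--             j += 1
--         k = j - i
--         if p[i] == 'L':
--             bl = (bl[0] + k * br[0], bl[1] + k * br[1])
--         else:
--             br = (br[0] + k * bl[0], br[1] + k * bl[1])
--         i = j
--     return [bl[0] + br[0], bl[1] + br[1]]
-- ===== Notes on version B (the rewrite author's own statement) =====
-- stated objective: alternative
-- what changed: B groups the string into maximal runs of identical letters and applies each run as one batched update (bl += k*br or br += k*bl), instead of A's per-character mediant additions.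
import Mathlib
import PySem

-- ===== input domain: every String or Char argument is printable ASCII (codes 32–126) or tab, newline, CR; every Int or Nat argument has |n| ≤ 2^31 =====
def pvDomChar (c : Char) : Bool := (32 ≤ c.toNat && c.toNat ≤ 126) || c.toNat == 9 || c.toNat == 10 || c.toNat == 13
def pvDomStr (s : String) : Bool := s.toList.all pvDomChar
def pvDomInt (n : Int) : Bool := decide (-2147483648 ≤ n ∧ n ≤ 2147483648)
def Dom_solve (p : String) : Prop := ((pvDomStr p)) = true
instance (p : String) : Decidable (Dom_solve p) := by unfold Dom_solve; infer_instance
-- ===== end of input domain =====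

-- B groups the string into maximal runs of identical letters and applies each run as one
-- batched update instead of A's per-character additions (alternative decomposition, same cost).

-- ===== PORT A =====
-- one iteration of A's for-loop: state is (beforeLeft, beforeRight)
def solveStep (st : (Int × Int) × (Int × Int)) (letter : Char) : (Int × Int) × (Int × Int) :=
  let overall := (st.1.1 + st.2.1, st.1.2 + st.2.2)
  if letter = 'L' then (overall, st.2) else (st.1, overall)

def solve (p : String) : List Int :=
  let st := p.toList.foldl solveStep ((1, 0), (0, 1))
  [st.1.1 + st.2.1, st.1.2 + st.2.2]

-- ===== PORT B =====
-- Source B's outer while loop: take the maximal run of the leading letter, apply it batched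
def solveRuns : List Char → (Int × Int) → (Int × Int) → List Int
  | [], bl, br => [bl.1 + br.1, bl.2 + br.2]
  | c :: rest, bl, br =>
    let k : Int := (rest.takeWhile (· = c)).length + 1
    let rest' := rest.dropWhile (· = c)
    if c = 'L' then solveRuns rest' (bl.1 + k * br.1, bl.2 + k * br.2) br
    else solveRuns rest' bl (br.1 + k * bl.1, br.2 + k * bl.2)
termination_by l => l.length
decreasing_by all_goals
  exact Nat.lt_succ_of_le (List.length_dropWhile_le _ _)

def solve_alt (p : String) : List Int := solveRuns p.toList (1, 0) (0, 1)

-- ===== PRECONDITION & SPEC =====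
def Spec_solve (p : String) (out : List Int) : Prop := out = solve_alt p
instance (p : String) (out : List Int) : Decidable (Spec_solve p out) := by unfold Spec_solve; infer_instance

-- ===== CLAIM (what is proved, stated in full; the proofs are below) =====
def Claim_equal_solve : Prop := ∀ (p : String), Dom_solve p → Spec_solve p (solve p)

-- ===== LEMMAS AND PROOFS =====

-- A's fold over a run of identical letters is the batched update
theorem foldl_run (ch : Char) (l : List Char) (h : ∀ c ∈ l, c = ch) (bl br : Int × Int) :
    l.foldl solveStep (bl, br) =
      if ch = 'L' then ((bl.1 + (l.length : Int) * br.1, bl.2 + (l.length : Int) * br.2), br)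
      else (bl, (br.1 + (l.length : Int) * bl.1, br.2 + (l.length : Int) * bl.2)) := by
  induction l generalizing bl br with
  | nil => simp
  | cons c l ih =>
    have hc : c = ch := h c (by simp)
    have h' : ∀ d ∈ l, d = ch := fun d hd => h d (by simp [hd])
    subst hc
    rw [List.foldl_cons]
    by_cases hL : c = 'L'
    · simp only [solveStep, hL, if_true, ih h', List.length_cons]
      refine Prod.ext (Prod.ext ?_ ?_) rfl <;> (show _ = _; push_cast; ring)
    · simp only [solveStep, hL, if_false, ih h', List.length_cons]
      refine Prod.ext rfl (Prod.ext ?_ ?_) <;> (show _ = _; push_cast; ring)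

theorem foldl_eq_runs (l : List Char) (bl br : Int × Int) :
    [(l.foldl solveStep (bl, br)).1.1 + (l.foldl solveStep (bl, br)).2.1,
     (l.foldl solveStep (bl, br)).1.2 + (l.foldl solveStep (bl, br)).2.2] =
      solveRuns l bl br := by
  induction hn : l.length using Nat.strong_induction_on generalizing l bl br with
  | _ n IH =>
    match l with
    | [] => simp [solveRuns]
    | c :: rest =>
      have hsplit : rest = rest.takeWhile (· = c) ++ rest.dropWhile (· = c) :=
        (List.takeWhile_append_dropWhile).symm
      have hrun : ∀ d ∈ c :: rest.takeWhile (· = c), d = c := by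
        intro d hd
        rcases List.mem_cons.1 hd with h | h
        · exact h
        · have := List.mem_takeWhile_imp h
          simpa using this
      have hlen : (rest.dropWhile (· = c)).length < n := by
        subst hn
        exact Nat.lt_succ_of_le (List.length_dropWhile_le _ _)
      have hfold : (c :: rest).foldl solveStep (bl, br) =
          (rest.dropWhile (· = c)).foldl solveStep
            ((c :: rest.takeWhile (· = c)).foldl solveStep (bl, br)) := by
        conv_lhs => rw [show c :: rest = (c :: rest.takeWhile (· = c)) ++ rest.dropWhile (· = c) by
          rw [List.cons_append]; rw [← hsplit]]
        rw [List.foldl_append]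
      rw [hfold, foldl_run c _ hrun]
      by_cases hL : c = 'L'
      · simp only [if_pos hL]
        rw [IH _ hlen _ _ _ rfl]
        simp only [solveRuns, if_pos hL, List.length_cons]
        push_cast
        ring_nf
      · simp only [if_neg hL]
        rw [IH _ hlen _ _ _ rfl]
        simp only [solveRuns, if_neg hL, List.length_cons]
        push_cast
        ring_nf

-- ===== VERDICT (by name: the statement is the Claim_ definition above) =====
theorem solve_spec : Claim_equal_solve := by
  intro p _
  unfold Spec_solve solve solve_alt
  exact foldl_eq_runs p.toList (1, 0) (0, 1)
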